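-- pv_equiv track=rewrite | github.com/ilanschnell/project-euler | 225.py | is_divisor
-- ===== SOURCE A (Python) =====
-- def is_divisor(m):
--     t1 = t2 = t3 = 1
--     while True:
--         t4 = t1 + t2 + t3
--         t4 %= m
--         if t4 == 0:
--             return True
--         t1 = t2
--         t2 = t3
--         t3 = t4
--         if t1 == t2 == t3 == 1:
--             return False
-- ===== SOURCE B (Python) =====
-- def is_divisor(m):
--     # Walk the tribonacci state cycle BACKWARDS with the inverted recurrence
--     # t_{n-1} = (t_{n+2} - t_n - t_{n+1}) % m.  The step map is invertible, so
--     # the orbit of (1,1,1) is a pure cycle and the backward walk visits exactly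
--     # the residues of one period: 0 occurs backwards iff it occurs forwards.
--     a, b, c = 1, 1, 1
--     p = (c - a - b) % m
--     while p != 0:
--         a, b, c = p, a, b
--         if (a, b, c) == (1, 1, 1):
--             return False
--         p = (c - a - b) % m
--     return True
-- ===== Notes on version B (the rewrite author's own statement) =====
-- stated objective: alternative
-- what changed: B traverses the tribonacci state cycle in the opposite direction using the inverted recurrence t_{n-1} = (t_{n+2} - t_n - t_{n+1}) % m (a while-condition loop on the backward term), which yields the same boolean because the step map is invertible so the orbit of (1,1,1) is a pure cycle containing 0 forwards iff backwards.
-- outside the precondition, e.g. on is_divisor(0): A raises ZeroDivisionError, B raises ZeroDivisionError; on is_divisor(-1): A returns True, B returns True; on is_divisor(-3): A returns True, B returns True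
import Mathlib
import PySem

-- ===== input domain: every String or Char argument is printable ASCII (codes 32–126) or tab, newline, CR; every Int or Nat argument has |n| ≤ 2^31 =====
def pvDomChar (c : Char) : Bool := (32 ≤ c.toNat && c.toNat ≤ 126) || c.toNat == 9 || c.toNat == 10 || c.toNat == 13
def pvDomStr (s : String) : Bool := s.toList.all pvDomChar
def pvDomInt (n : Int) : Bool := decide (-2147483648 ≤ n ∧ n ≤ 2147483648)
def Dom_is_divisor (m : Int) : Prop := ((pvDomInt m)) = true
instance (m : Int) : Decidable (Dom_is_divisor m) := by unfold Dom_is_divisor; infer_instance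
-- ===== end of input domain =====

-- B walks the tribonacci state cycle BACKWARDS with the inverted recurrence
-- t_{n-1} = (t_{n+2} - t_n - t_{n+1}) % m; same boolean since the step map is
-- invertible, so the orbit of (1,1,1) is a pure cycle (alternative algorithm, same cost).

-- ===== PORT A =====
-- A's 'while True' loop as fuel recursion (fuel only makes the loop total; for
-- every m ≥ 1 the loop terminates within m^3 + 2 iterations, so the fuel suffices).
def isDivLoopA (m : Int) : Nat → Int → Int → Int → Bool
  | 0, _, _, _ => false
  | fuel + 1, t1, t2, t3 =>
    let t4 := PySem.Int.mod (t1 + t2 + t3) m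
    if t4 = 0 then true
    else if t2 = 1 ∧ t3 = 1 ∧ t4 = 1 then false
    else isDivLoopA m fuel t2 t3 t4

def is_divisor (m : Int) : Bool := isDivLoopA m (m.natAbs ^ 3 + 2) 1 1 1

-- ===== PORT B =====
-- B's 'while p != 0' loop: p is the previously computed backward term,
-- (a,b,c) the current state triple; on each pass the state shifts backwards.
def isDivLoopB (m : Int) : Nat → Int → Int → Int → Int → Bool
  | 0, _, _, _, _ => false
  | fuel + 1, a, b, c, p =>
    if p = 0 then true
    else if p = 1 ∧ a = 1 ∧ b = 1 then false
    else isDivLoopB m fuel p a b (PySem.Int.mod (b - p - a) m)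

def is_divisor_alt (m : Int) : Bool :=
  isDivLoopB m (m.natAbs ^ 3 + 2) 1 1 1 (PySem.Int.mod (1 - 1 - 1) m)

-- ===== PRECONDITION & SPEC =====
-- Pre_ excludes m ≤ 0: both programs raise ZeroDivisionError at m = 0 and loop forever
-- for most negative m (e.g. m = -2), since the terminating state (1,1,1) is unreachable
-- there; on the few negative m where A does return (it hits 0) B returns the same value.
def Pre_is_divisor (m : Int) : Prop := 1 ≤ m
instance (m : Int) : Decidable (Pre_is_divisor m) := by unfold Pre_is_divisor; infer_instance
def pvWitness_is_divisor : Int := (7)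

def Spec_is_divisor (m : Int) (out : Bool) : Prop := out = is_divisor_alt m
instance (m : Int) (out : Bool) : Decidable (Spec_is_divisor m out) := by unfold Spec_is_divisor; infer_instance

-- ===== CLAIM (what is proved, stated in full; the proofs are below) =====
def Claim_equal_is_divisor : Prop := ∀ (m : Int), Dom_is_divisor m → Pre_is_divisor m → Spec_is_divisor m (is_divisor m)

-- ===== LEMMAS AND PROOFS =====

-- The forward step map, the backward (inverse) step map, and orbits of (1,1,1).
def fwd (m : Int) (s : Int × Int × Int) : Int × Int × Int :=
  (s.2.1, s.2.2, (s.1 + s.2.1 + s.2.2) % m)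

def bwd (m : Int) (s : Int × Int × Int) : Int × Int × Int :=
  ((s.2.2 - s.1 - s.2.1) % m, s.1, s.2.1)

def orb (step : Int × Int × Int → Int × Int × Int) : Nat → Int × Int × Int
  | 0 => (1, 1, 1)
  | n + 1 => step (orb step n)

-- Common shape of both loops: step, check the designated component of the new
-- state for 0, stop with false when the new state is (1,1,1).
def genLoop (step : Int × Int × Int → Int × Int × Int) (out : Int × Int × Int → Int) :
    Nat → Int × Int × Int → Bool
  | 0, _ => false
  | fuel + 1, s =>
    let s' := step s
    if out s' = 0 then true
    else if s' = ((1:Int), (1:Int), (1:Int)) then false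
    else genLoop step out fuel s'

lemma A_eq_gen (m : Int) (hm : 0 < m) :
    ∀ (fuel : Nat) (t1 t2 t3 : Int),
      isDivLoopA m fuel t1 t2 t3 = genLoop (fwd m) (fun s => s.2.2) fuel (t1, t2, t3) := by
  have hmod : ∀ x : Int, PySem.Int.mod x m = x % m :=
    fun x => PySem.Int.mod_eq_emod_of_pos hm
  intro fuel
  induction fuel with
  | zero => intro t1 t2 t3; rfl
  | succ n ih =>
    intro t1 t2 t3
    have ihX := ih t2 t3 ((t1 + t2 + t3) % m)
    simp only [isDivLoopA, genLoop, fwd, hmod]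
    by_cases hz : (t1 + t2 + t3) % m = 0
    · rw [if_pos hz, if_pos hz]
    · rw [if_neg hz, if_neg hz]
      by_cases h1 : t2 = 1 ∧ t3 = 1 ∧ (t1 + t2 + t3) % m = 1
      · rw [if_pos h1, if_pos (show ((t2, t3, (t1 + t2 + t3) % m) : Int × Int × Int)
            = ((1:Int), (1:Int), (1:Int)) by rw [h1.2.2, h1.1, h1.2.1])]
      · rw [if_neg h1, if_neg (show ¬ ((t2, t3, (t1 + t2 + t3) % m) : Int × Int × Int)
            = ((1:Int), (1:Int), (1:Int)) from by simpa [Prod.ext_iff] using h1)]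
        exact ihX

lemma B_eq_gen (m : Int) (hm : 0 < m) :
    ∀ (fuel : Nat) (a b c : Int),
      isDivLoopB m fuel a b c (PySem.Int.mod (c - a - b) m)
        = genLoop (bwd m) (fun s => s.1) fuel (a, b, c) := by
  have hmod : ∀ x : Int, PySem.Int.mod x m = x % m :=
    fun x => PySem.Int.mod_eq_emod_of_pos hm
  intro fuel
  induction fuel with
  | zero => intro a b c; rfl
  | succ n ih =>
    intro a b c
    have ihp := ih ((c - a - b) % m) a b
    simp only [hmod] at ihp
    simp only [isDivLoopB, genLoop, bwd, hmod]
    by_cases hz : (c - a - b) % m = 0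
    · rw [if_pos hz, if_pos hz]
    · rw [if_neg hz, if_neg hz]
      by_cases h1 : (c - a - b) % m = 1 ∧ a = 1 ∧ b = 1
      · rw [if_pos h1, if_pos (show (((c - a - b) % m, a, b) : Int × Int × Int)
            = ((1:Int), (1:Int), (1:Int)) by rw [h1.1, h1.2.1, h1.2.2])]
      · rw [if_neg h1, if_neg (show ¬ (((c - a - b) % m, a, b) : Int × Int × Int)
            = ((1:Int), (1:Int), (1:Int)) from by simpa [Prod.ext_iff] using h1)]
        exact ihp

-- Orbit periodicity from any return time P.
lemma orb_add_period (step : Int × Int × Int → Int × Int × Int) (P : Nat)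
    (hper : orb step P = (1, 1, 1)) : ∀ n, orb step (n + P) = orb step n := by
  intro n
  induction n with
  | zero => simpa [orb] using hper
  | succ k ih =>
    rw [show k + 1 + P = (k + P) + 1 by ring]
    show step (orb step (k + P)) = step (orb step k)
    rw [ih]

lemma orb_mod (step : Int × Int × Int → Int × Int × Int) (P : Nat) (hP : 1 ≤ P)
    (hper : orb step P = (1, 1, 1)) : ∀ n, orb step n = orb step (n % P) := by
  have aux : ∀ q r, orb step (P * q + r) = orb step r := by
    intro q
    induction q with
    | zero => intro r; simp
    | succ k ih =>
      intro r
      rw [show P * (k + 1) + r = (P * k + r) + P by ring, orb_add_period step P hper, ih]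
  intro n
  conv_lhs => rw [← Nat.div_add_mod n P]
  exact aux (n / P) (n % P)

-- genLoop returns true only if the orbit hits a zero of `out`.
lemma gen_true_exists (step : Int × Int × Int → Int × Int × Int)
    (out : Int × Int × Int → Int) :
    ∀ (fuel n : Nat), genLoop step out fuel (orb step n) = true →
      ∃ k, out (orb step (k + 1)) = 0 := by
  intro fuel
  induction fuel with
  | zero => intro n h; simp [genLoop] at h
  | succ f ih =>
    intro n h
    have hs : step (orb step n) = orb step (n + 1) := rfl
    simp only [genLoop, hs] at h
    by_cases hz : out (orb step (n + 1)) = 0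
    · exact ⟨n, hz⟩
    · simp only [if_neg hz] at h
      by_cases he : orb step (n + 1) = ((1:Int), (1:Int), (1:Int))
      · simp [he] at h
      · simp only [if_neg he] at h
        exact ih (n + 1) h

-- If the orbit hits a zero, genLoop finds it (fuel ≥ any return time P).
lemma gen_true_of_zero (step : Int × Int × Int → Int × Int × Int)
    (out : Int × Int × Int → Int) (P : Nat)
    (hout : out ((1:Int), (1:Int), (1:Int)) ≠ 0)
    (hP : 1 ≤ P) (hper : orb step P = (1, 1, 1))
    (hZ : ∃ k, out (orb step (k + 1)) = 0) :
    ∀ fuel, P ≤ fuel → genLoop step out fuel (orb step 0) = true := by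
  intro fuel hfuel
  classical
  set km := Nat.find hZ with hkm
  have hzero : out (orb step (km + 1)) = 0 := Nat.find_spec hZ
  have hmin : ∀ j, j < km → out (orb step (j + 1)) ≠ 0 := fun j hj => Nat.find_min hZ hj
  -- the first zero index lies within one period
  have hkmP : km + 1 ≤ P := by
    have hmodz : out (orb step ((km + 1) % P)) = 0 := by
      rw [← orb_mod step P hP hper]; exact hzero
    have hrP : (km + 1) % P < P := Nat.mod_lt _ (by omega)
    have hr1 : 1 ≤ (km + 1) % P := by
      rcases Nat.eq_zero_or_pos ((km + 1) % P) with h0 | hp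
      · rw [h0] at hmodz; simp only [orb] at hmodz; exact absurd hmodz hout
      · exact hp
    have hle : km ≤ (km + 1) % P - 1 := by
      by_contra hc
      exact hmin ((km + 1) % P - 1) (by omega)
        (by rw [show (km + 1) % P - 1 + 1 = (km + 1) % P by omega]; exact hmodz)
    omega
  -- walk to the zero
  have main : ∀ (d n fuel : Nat), n + d = km + 1 → 1 ≤ d → d ≤ fuel →
      genLoop step out fuel (orb step n) = true := by
    intro d
    induction d with
    | zero => intro n fuel h; omega
    | succ e ih =>
      intro n fuel hnd _ hfuel
      obtain ⟨f, rfl⟩ : ∃ f, fuel = f + 1 := ⟨fuel - 1, by omega⟩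
      have hs : step (orb step n) = orb step (n + 1) := rfl
      rcases Nat.eq_zero_or_pos e with h0 | he1
      · have hn1 : n + 1 = km + 1 := by omega
        simp only [genLoop, hs, hn1, hzero, if_pos]
      · have hz : out (orb step (n + 1)) ≠ 0 := hmin n (by omega)
        have he : orb step (n + 1) ≠ ((1:Int), (1:Int), (1:Int)) := by
          intro hret
          -- n+1 would be a period; a zero index below n+1 contradicts minimality
          have hmodz : out (orb step ((km + 1) % (n + 1))) = 0 := by
            rw [← orb_mod step (n + 1) (by omega) hret]; exact hzero
          have hrP : (km + 1) % (n + 1) < n + 1 := Nat.mod_lt _ (by omega)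
          have hr1 : 1 ≤ (km + 1) % (n + 1) := by
            rcases Nat.eq_zero_or_pos ((km + 1) % (n + 1)) with h0' | hp'
            · rw [h0'] at hmodz; simp only [orb] at hmodz; exact absurd hmodz hout
            · exact hp'
          exact hmin ((km + 1) % (n + 1) - 1) (by omega)
            (by rw [show (km + 1) % (n + 1) - 1 + 1 = (km + 1) % (n + 1) by omega]; exact hmodz)
        simp only [genLoop, hs, if_neg hz, if_neg he]
        exact ih (n + 1) f (by omega) he1 (by omega)
  exact main (km + 1) 0 fuel (by omega) (by omega) (by omega)

-- Characterization: with a return time P ≤ fuel, genLoop from (1,1,1) answers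
-- "does the orbit hit a zero of out".
lemma gen_char (step : Int × Int × Int → Int × Int × Int)
    (out : Int × Int × Int → Int) (P fuel : Nat)
    (hout : out ((1:Int), (1:Int), (1:Int)) ≠ 0)
    (hP : 1 ≤ P) (hper : orb step P = (1, 1, 1)) (hfuel : P ≤ fuel) :
    genLoop step out fuel (1, 1, 1) = true ↔ ∃ k, out (orb step (k + 1)) = 0 := by
  have h0 : ((1:Int), (1:Int), (1:Int)) = orb step 0 := rfl
  constructor
  · intro h; exact gen_true_exists step out fuel 0 (by rwa [← h0])
  · intro hZ
    have := gen_true_of_zero step out P hout hP hper hZ fuel hfuel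
    rwa [← h0] at this

-- ---- the m-specific part (m ≥ 2): invertibility, good states, pigeonhole period ----

def Good (m : Int) (s : Int × Int × Int) : Prop :=
  0 ≤ s.1 ∧ s.1 < m ∧ 0 ≤ s.2.1 ∧ s.2.1 < m ∧ 0 ≤ s.2.2 ∧ s.2.2 < m

lemma good_fwd (m : Int) (hm : 0 < m) (s : Int × Int × Int) (h : Good m s) :
    Good m (fwd m s) := by
  obtain ⟨h1, h2, h3, h4, h5, h6⟩ := h
  exact ⟨h3, h4, h5, h6, Int.emod_nonneg _ (by omega), Int.emod_lt_of_pos _ hm⟩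

lemma bwd_fwd (m : Int) (s : Int × Int × Int) (h : Good m s) :
    bwd m (fwd m s) = s := by
  obtain ⟨a, b, c⟩ := s
  obtain ⟨h1, h2, h3, h4, h5, h6⟩ := h
  simp only [fwd, bwd]
  have hX : ((a + b + c) % m - b - c) % m = a := by
    rw [sub_sub, Int.sub_emod, Int.emod_emod_of_dvd _ dvd_rfl, ← Int.sub_emod,
      show a + b + c - (b + c) = a by ring]
    exact Int.emod_eq_of_lt h1 h2
  rw [hX]

lemma good_init (m : Int) (hm : 2 ≤ m) : Good m ((1:Int), (1:Int), (1:Int)) := by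
  exact ⟨by norm_num, by show (1:Int) < m; omega, by norm_num, by show (1:Int) < m; omega,
    by norm_num, by show (1:Int) < m; omega⟩

lemma good_orb_fwd (m : Int) (hm : 2 ≤ m) : ∀ n, Good m (orb (fwd m) n) := by
  intro n
  induction n with
  | zero => exact good_init m hm
  | succ k ih => exact good_fwd m (by omega) _ ih

lemma orb_fwd_cancel (m : Int) (hm : 2 ≤ m) :
    ∀ (k a b : Nat), orb (fwd m) (a + k) = orb (fwd m) (b + k) →
      orb (fwd m) a = orb (fwd m) b := by
  intro k
  induction k with
  | zero => intro a b h; simpa using h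
  | succ j ih =>
    intro a b h
    apply ih
    have ha : orb (fwd m) (a + j) = bwd m (orb (fwd m) (a + j + 1)) := by
      rw [show orb (fwd m) (a + j + 1) = fwd m (orb (fwd m) (a + j)) from rfl,
        bwd_fwd m _ (good_orb_fwd m hm _)]
    have hb : orb (fwd m) (b + j) = bwd m (orb (fwd m) (b + j + 1)) := by
      rw [show orb (fwd m) (b + j + 1) = fwd m (orb (fwd m) (b + j)) from rfl,
        bwd_fwd m _ (good_orb_fwd m hm _)]
    have h' : orb (fwd m) (a + j + 1) = orb (fwd m) (b + j + 1) := by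
      rw [show a + j + 1 = a + (j + 1) by omega, show b + j + 1 = b + (j + 1) by omega]
      exact h
    rw [ha, hb, h']

-- Pigeonhole: the forward orbit returns to (1,1,1) within m^3 steps.
lemma exists_period (m : Int) (hm : 2 ≤ m) :
    ∃ P, 1 ≤ P ∧ P ≤ m.natAbs ^ 3 ∧ orb (fwd m) P = (1, 1, 1) := by
  classical
  set N := m.natAbs ^ 3 with hN
  set box : Finset (Int × Int × Int) :=
    Finset.Ico 0 m ×ˢ (Finset.Ico 0 m ×ˢ Finset.Ico 0 m) with hbox
  have h1 : (Finset.Ico (0:Int) m).card = m.natAbs := by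
    rw [Int.card_Ico]; omega
  have hboxcard : box.card = N := by
    rw [hbox, Finset.card_product, Finset.card_product, h1, hN]
    ring
  have hmaps : ∀ i : Fin (N + 1), orb (fwd m) i ∈ box := by
    intro i
    obtain ⟨g1, g2, g3, g4, g5, g6⟩ := good_orb_fwd m hm i
    rw [hbox]
    simp only [Finset.mem_product, Finset.mem_Ico]
    exact ⟨⟨g1, g2⟩, ⟨g3, g4⟩, ⟨g5, g6⟩⟩
  have hcard : box.card < (Finset.univ : Finset (Fin (N + 1))).card := by
    rw [hboxcard, Finset.card_univ, Fintype.card_fin]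
    omega
  obtain ⟨i, -, j, -, hij, heq⟩ :=
    Finset.exists_ne_map_eq_of_card_lt_of_maps_to hcard (fun i _ => hmaps i)
  have hvij : (i : Nat) ≠ (j : Nat) := fun h => hij (Fin.ext h)
  rcases lt_or_gt_of_ne hvij with hlt | hlt
  · refine ⟨(j : Nat) - i, by omega, by have := j.isLt; omega, ?_⟩
    have h' : orb (fwd m) (((j : Nat) - i) + i) = orb (fwd m) (0 + i) := by
      rw [show ((j : Nat) - i) + (i : Nat) = j by omega, show 0 + (i : Nat) = i by omega]
      exact heq.symm
    simpa using orb_fwd_cancel m hm i _ 0 h'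
  · refine ⟨(i : Nat) - j, by omega, by have := i.isLt; omega, ?_⟩
    have h' : orb (fwd m) (((i : Nat) - j) + j) = orb (fwd m) (0 + j) := by
      rw [show ((i : Nat) - j) + (j : Nat) = i by omega, show 0 + (j : Nat) = j by omega]
      exact heq
    simpa using orb_fwd_cancel m hm j _ 0 h'

-- The backward orbit retraces the forward cycle: t_k = s_{P-k} for k ≤ P.
lemma bwd_orb_eq (m : Int) (hm : 2 ≤ m) (P : Nat) (hper : orb (fwd m) P = (1, 1, 1)) :
    ∀ k, k ≤ P → orb (bwd m) k = orb (fwd m) (P - k) := by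
  intro k
  induction k with
  | zero => intro _; simpa [orb] using hper.symm
  | succ j ih =>
    intro hj
    have hj' : j ≤ P := by omega
    have h1 : orb (bwd m) (j + 1) = bwd m (orb (fwd m) (P - j)) := by
      rw [show orb (bwd m) (j + 1) = bwd m (orb (bwd m) j) from rfl, ih hj']
    rw [h1, show P - j = (P - (j + 1)) + 1 by omega,
      show orb (fwd m) ((P - (j + 1)) + 1) = fwd m (orb (fwd m) (P - (j + 1))) from rfl,
      bwd_fwd m _ (good_orb_fwd m hm _)]

-- zero among the forward orbit values iff zero among the backward orbit values
lemma zero_iff (m : Int) (hm : 2 ≤ m) (P : Nat) (hP : 1 ≤ P)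
    (hper : orb (fwd m) P = (1, 1, 1)) :
    (∃ k, (orb (fwd m) (k + 1)).2.2 = 0) ↔ (∃ k, (orb (bwd m) (k + 1)).1 = 0) := by
  have hbper : orb (bwd m) P = (1, 1, 1) := by
    rw [bwd_orb_eq m hm P hper P le_rfl]
    simp [orb]
  have third_first : ∀ n, (orb (fwd m) (n + 3)).1 = (orb (fwd m) (n + 1)).2.2 :=
    fun n => rfl
  constructor
  · rintro ⟨k, hk⟩
    have hk3 : (orb (fwd m) (k + 3)).1 = 0 := by rw [third_first]; exact hk
    have hmodz : (orb (fwd m) ((k + 3) % P)).1 = 0 := by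
      rw [← orb_mod (fwd m) P hP hper]; exact hk3
    have hrP : (k + 3) % P < P := Nat.mod_lt _ (by omega)
    have hr1 : 1 ≤ (k + 3) % P := by
      rcases Nat.eq_zero_or_pos ((k + 3) % P) with h0 | hp
      · rw [h0] at hmodz; norm_num [orb] at hmodz
      · exact hp
    refine ⟨P - (k + 3) % P - 1, ?_⟩
    rw [show P - (k + 3) % P - 1 + 1 = P - (k + 3) % P by omega,
      bwd_orb_eq m hm P hper (P - (k + 3) % P) (by omega),
      show P - (P - (k + 3) % P) = (k + 3) % P by omega]
    exact hmodz
  · rintro ⟨k, hk⟩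
    have hmodz : (orb (bwd m) ((k + 1) % P)).1 = 0 := by
      rw [← orb_mod (bwd m) P hP hbper]; exact hk
    have hrP : (k + 1) % P < P := Nat.mod_lt _ (by omega)
    have hr1 : 1 ≤ (k + 1) % P := by
      rcases Nat.eq_zero_or_pos ((k + 1) % P) with h0 | hp
      · rw [h0] at hmodz; norm_num [orb] at hmodz
      · exact hp
    have hfz : (orb (fwd m) (P - (k + 1) % P)).1 = 0 := by
      rw [← bwd_orb_eq m hm P hper ((k + 1) % P) (by omega)]; exact hmodz
    have hj3 : 3 ≤ P - (k + 1) % P := by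
      rcases Nat.lt_or_ge (P - (k + 1) % P) 3 with hlt | hge
      · exfalso
        have hcase : P - (k + 1) % P = 1 ∨ P - (k + 1) % P = 2 := by omega
        rcases hcase with h | h <;> rw [h] at hfz <;> norm_num [orb, fwd] at hfz
      · exact hge
    refine ⟨P - (k + 1) % P - 3, ?_⟩
    rw [← third_first (P - (k + 1) % P - 3), show P - (k + 1) % P - 3 + 3 = P - (k + 1) % P by omega]
    exact hfz

-- ===== VERDICT (by name: the statement is the Claim_ definition above) =====
theorem is_divisor_spec : Claim_equal_is_divisor := by
  intro m _ hpre
  unfold Spec_is_divisor is_divisor is_divisor_alt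
  have hm1 : 1 ≤ m := hpre
  rcases eq_or_lt_of_le hm1 with h1 | h2
  · -- m = 1: both return true immediately
    subst h1
    decide
  · have hm : 2 ≤ m := by omega
    have hm0 : 0 < m := by omega
    obtain ⟨P, hP1, hPN, hper⟩ := exists_period m hm
    have hbper : orb (bwd m) P = (1, 1, 1) := by
      rw [bwd_orb_eq m hm P hper P le_rfl]
      simp [orb]
    rw [A_eq_gen m hm0, B_eq_gen m hm0]
    rw [Bool.eq_iff_iff]
    rw [gen_char (fwd m) (fun s => s.2.2) P (m.natAbs ^ 3 + 2) (by norm_num) hP1 hper (by omega),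
      gen_char (bwd m) (fun s => s.1) P (m.natAbs ^ 3 + 2) (by norm_num) hP1 hbper (by omega)]
    exact zero_iff m hm P hP1 hper
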